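-- pv_equiv track=rewrite | github.com/SIYAKS-ARES/smart-doc-insight | app/utils/pdf_utils.py | _legacy_chunk_text
-- ===== SOURCE A (Python) =====
-- def _legacy_chunk_text(text, max_chunk_size=1000):
--     """
--     Eski metin bölümleme yöntemi,
--     RecursiveCharacterTextSplitter başarısız olursa yedek olarak kullanılır
--     """
--     chunks = []
--     current_chunk = ""
--
--     # Paragrafları böler
--     paragraphs = text.split("\n\n")
--
--     for paragraph in paragraphs:
--         # Eğer paragraf fazla uzunsa, cümlelere böl
--         if len(paragraph) > max_chunk_size:
--             sentences = paragraph.split(". ")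
--             for sentence in sentences:
--                 if len(current_chunk) + len(sentence) <= max_chunk_size:
--                     current_chunk += sentence + ". "
--                 else:
--                     chunks.append(current_chunk.strip())
--                     current_chunk = sentence + ". "
--         else:
--             if len(current_chunk) + len(paragraph) <= max_chunk_size:
--                 current_chunk += paragraph + "\n\n"
--             else:
--                 chunks.append(current_chunk.strip())
--                 current_chunk = paragraph + "\n\n"
--
--     # Son parçayı ekleyin
--     if current_chunk:
--         chunks.append(current_chunk.strip())
--
--     return chunks
-- ===== SOURCE B (Python) =====
-- def _legacy_chunk_text(text, max_chunk_size=1000):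
--     # Phase 1: flatten the text into (content, suffix) units in order.
--     units = []
--     for paragraph in text.split("\n\n"):
--         if len(paragraph) > max_chunk_size:
--             for sentence in paragraph.split(". "):
--                 units.append((sentence, ". "))
--         else:
--             units.append((paragraph, "\n\n"))
--     # Phase 2: one greedy packing pass over the units.
--     chunks = []
--     current_chunk = ""
--     for content, suffix in units:
--         if len(current_chunk) + len(content) <= max_chunk_size:
--             current_chunk += content + suffix
--         else:
--             chunks.append(current_chunk.strip())
--             current_chunk = content + suffix
--     if current_chunk:
--         chunks.append(current_chunk.strip())
--     return chunks
-- ===== Notes on version B (the rewrite author's own statement) =====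
-- stated objective: alternative
-- what changed: B separates splitting from packing: it first flattens the text into an ordered list of (content, suffix) units (whole paragraphs, or sentences of oversized paragraphs), then packs them with a single greedy loop, replacing A's nested loops with duplicated packing logic.
import Mathlib
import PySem

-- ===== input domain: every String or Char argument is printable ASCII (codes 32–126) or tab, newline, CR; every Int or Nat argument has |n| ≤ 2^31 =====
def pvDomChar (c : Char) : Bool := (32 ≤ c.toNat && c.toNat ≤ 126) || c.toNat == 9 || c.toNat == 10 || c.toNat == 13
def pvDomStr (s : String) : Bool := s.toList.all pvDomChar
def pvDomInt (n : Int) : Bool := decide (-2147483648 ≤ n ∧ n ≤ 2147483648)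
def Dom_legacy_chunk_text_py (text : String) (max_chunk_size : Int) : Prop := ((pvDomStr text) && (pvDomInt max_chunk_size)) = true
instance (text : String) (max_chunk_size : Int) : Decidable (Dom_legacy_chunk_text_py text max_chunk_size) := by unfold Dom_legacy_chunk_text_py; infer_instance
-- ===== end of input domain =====

-- B changes the decomposition: it flattens the text into (content, suffix) units first, then
-- packs them in one greedy pass (A interleaves splitting and packing in nested loops); objective: alternative.

-- ===== PORT A =====
-- Literal transliteration of A: nested loops over paragraphs/sentences, state (chunks, current_chunk).
def legacy_chunk_text_py (text : String) (max_chunk_size : Int) : List String :=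
  let paragraphs := PySem.Chars.splitOn text.toList "\n\n".toList
  let st := paragraphs.foldl (fun (st : List (List Char) × List Char) paragraph =>
    if (paragraph.length : Int) > max_chunk_size then
      let sentences := PySem.Chars.splitOn paragraph ". ".toList
      sentences.foldl (fun st sentence =>
        if (st.2.length : Int) + (sentence.length : Int) ≤ max_chunk_size then
          (st.1, st.2 ++ sentence ++ ". ".toList)
        else
          (st.1 ++ [PySem.Chars.strip st.2], sentence ++ ". ".toList)) st
    else
      if (st.2.length : Int) + (paragraph.length : Int) ≤ max_chunk_size then
        (st.1, st.2 ++ paragraph ++ "\n\n".toList)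
      else
        (st.1 ++ [PySem.Chars.strip st.2], paragraph ++ "\n\n".toList)) ([], [])
  (if st.2 ≠ [] then st.1 ++ [PySem.Chars.strip st.2] else st.1).map String.ofList

-- ===== PORT B =====
-- Phase 1 of Source B: the ordered unit list (content, suffix).
def pvUnits (text : String) (max_chunk_size : Int) : List (List Char × List Char) :=
  (PySem.Chars.splitOn text.toList "\n\n".toList).flatMap (fun paragraph =>
    if (paragraph.length : Int) > max_chunk_size then
      (PySem.Chars.splitOn paragraph ". ".toList).map (fun sentence => (sentence, ". ".toList))
    else [(paragraph, "\n\n".toList)])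

-- Phase 2 of Source B: one greedy packing step.
def pvPack (max_chunk_size : Int) (st : List (List Char) × List Char)
    (u : List Char × List Char) : List (List Char) × List Char :=
  if (st.2.length : Int) + (u.1.length : Int) ≤ max_chunk_size then
    (st.1, st.2 ++ u.1 ++ u.2)
  else
    (st.1 ++ [PySem.Chars.strip st.2], u.1 ++ u.2)

def legacy_chunk_text_py_alt (text : String) (max_chunk_size : Int) : List String :=
  let st := (pvUnits text max_chunk_size).foldl (pvPack max_chunk_size) ([], [])
  (if st.2 ≠ [] then st.1 ++ [PySem.Chars.strip st.2] else st.1).map String.ofList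

-- ===== PRECONDITION & SPEC =====
def Spec_legacy_chunk_text_py (text : String) (max_chunk_size : Int) (out : List String) : Prop := out = legacy_chunk_text_py_alt text max_chunk_size
instance (text : String) (max_chunk_size : Int) (out : List String) : Decidable (Spec_legacy_chunk_text_py text max_chunk_size out) := by unfold Spec_legacy_chunk_text_py; infer_instance

-- ===== CLAIM (what is proved, stated in full; the proofs are below) =====
def Claim_equal_legacy_chunk_text_py : Prop := ∀ (text : String) (max_chunk_size : Int), Dom_legacy_chunk_text_py text max_chunk_size → Spec_legacy_chunk_text_py text max_chunk_size (legacy_chunk_text_py text max_chunk_size)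

-- ===== LEMMAS AND PROOFS =====
-- Folding over a flatMap equals the nested fold over the pieces.
theorem pv_foldl_flatMap {α β σ : Type} (f : α → List β) (g : σ → β → σ)
    (l : List α) (init : σ) :
    (l.flatMap f).foldl g init = l.foldl (fun s a => (f a).foldl g s) init := by
  induction l generalizing init with
  | nil => rfl
  | cons x xs ih => simp [List.flatMap_cons, List.foldl_append, ih]

theorem pv_step_eq (m : Int) :
    (fun (st : List (List Char) × List Char) (paragraph : List Char) =>
      if (paragraph.length : Int) > m then
        let sentences := PySem.Chars.splitOn paragraph ". ".toList
        sentences.foldl (fun st sentence =>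
          if (st.2.length : Int) + (sentence.length : Int) ≤ m then
            (st.1, st.2 ++ sentence ++ ". ".toList)
          else
            (st.1 ++ [PySem.Chars.strip st.2], sentence ++ ". ".toList)) st
      else
        if (st.2.length : Int) + (paragraph.length : Int) ≤ m then
          (st.1, st.2 ++ paragraph ++ "\n\n".toList)
        else
          (st.1 ++ [PySem.Chars.strip st.2], paragraph ++ "\n\n".toList))
    = (fun s a =>
        (if (a.length : Int) > m then
          (PySem.Chars.splitOn a ". ".toList).map (fun sentence => (sentence, ". ".toList))
        else [(a, "\n\n".toList)]).foldl (pvPack m) s) := by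
  funext st p
  by_cases h : (p.length : Int) > m <;> simp [h, pvPack, List.foldl_map]

theorem legacy_chunk_text_py_eq_alt (text : String) (max_chunk_size : Int) :
    legacy_chunk_text_py text max_chunk_size = legacy_chunk_text_py_alt text max_chunk_size := by
  simp only [legacy_chunk_text_py, legacy_chunk_text_py_alt, pvUnits, pv_foldl_flatMap,
    pv_step_eq]

-- ===== VERDICT (by name: the statement is the Claim_ definition above) =====
theorem legacy_chunk_text_py_spec : Claim_equal_legacy_chunk_text_py := by
  intro text m _
  unfold Spec_legacy_chunk_text_py
  exact legacy_chunk_text_py_eq_alt text m
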